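-- pv_equiv track=rewrite | github.com/s426818/university-classes | algorytmy grafowe/06SzyszkoPaulina.py | create_complete_adjacency_list
-- ===== SOURCE A (Python) =====
-- from copy import deepcopy
--
-- def create_complete_adjacency_list(list_of_edges, adjacency_list):
--     adjacency_list_copy = deepcopy(adjacency_list)
--     list_of_edges_copy = deepcopy(list_of_edges)
--     complete_adjacency_list = {}
--     for node in adjacency_list_copy.keys():
--         neighbours = []
--         nodes_v = list(filter(lambda x: x[1] == node, list_of_edges_copy.keys()))
--         for tuple in nodes_v:
--             neighbours.append(tuple[0])
--         nodes_v = list(filter(lambda x: x[0] == node, list_of_edges_copy.keys()))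
--         for tuple in nodes_v:
--             neighbours.append(tuple[1])
--         complete_adjacency_list[node] = sorted(deepcopy(neighbours))
--     return complete_adjacency_list
-- ===== SOURCE B (Python) =====
-- def create_complete_adjacency_list(list_of_edges, adjacency_list):
--     neighbours = {}
--     for (u, v) in list_of_edges:
--         neighbours.setdefault(v, []).append(u)
--         neighbours.setdefault(u, []).append(v)
--     return {node: sorted(neighbours.get(node, [])) for node in adjacency_list}
-- ===== Notes on version B (the rewrite author's own statement) =====
-- stated objective: faster
-- what changed: Replaces A's per-node double scan of the whole edge set (two filters per node) by a single pass over the edges that groups both endpoints into a dict of neighbour lists, then sorts each bucket.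
import Mathlib
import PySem

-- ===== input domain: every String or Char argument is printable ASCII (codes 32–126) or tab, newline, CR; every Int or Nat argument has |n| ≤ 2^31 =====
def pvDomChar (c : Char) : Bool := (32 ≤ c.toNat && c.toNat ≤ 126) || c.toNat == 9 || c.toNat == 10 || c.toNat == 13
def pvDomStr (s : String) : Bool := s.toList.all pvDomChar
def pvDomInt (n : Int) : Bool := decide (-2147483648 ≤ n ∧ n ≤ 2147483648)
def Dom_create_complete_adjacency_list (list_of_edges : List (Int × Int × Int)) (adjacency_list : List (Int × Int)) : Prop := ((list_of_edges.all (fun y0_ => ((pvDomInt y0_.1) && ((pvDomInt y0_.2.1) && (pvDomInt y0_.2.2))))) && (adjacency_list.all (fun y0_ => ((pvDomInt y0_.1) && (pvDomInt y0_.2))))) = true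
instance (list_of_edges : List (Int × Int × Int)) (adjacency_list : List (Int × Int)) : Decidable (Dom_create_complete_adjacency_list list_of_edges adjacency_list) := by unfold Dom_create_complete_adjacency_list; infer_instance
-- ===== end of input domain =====

-- B replaces A's per-node scans of the whole edge set by one pass over the edges that
-- groups both endpoints into a dict, then sorts each bucket (objective: faster).

-- ===== PORT A =====
-- list_of_edges is a Python dict keyed by the (u, v) pair; adjacency_list a dict keyed by
-- the node: their key views are the deduplicated (first occurrence) key lists.
def create_complete_adjacency_list (list_of_edges : List (Int × Int × Int)) (adjacency_list : List (Int × Int)) : List (Int × List Int) :=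
  let edgeKeys := PySem.List.dedup (list_of_edges.map (fun e => (e.1, e.2.1)))
  let nodes := PySem.List.dedup (adjacency_list.map (fun p => p.1))
  (nodes.foldl
    (fun d node =>
      let n1 := (edgeKeys.filter (fun x => x.2 == node)).foldl (fun ns t => ns ++ [t.1]) []
      let nb := (edgeKeys.filter (fun x => x.1 == node)).foldl (fun ns t => ns ++ [t.2]) n1
      d.insert node (PySem.List.sorted nb (fun x => x) false))
    PySem.Dict.empty).items

-- ===== PORT B =====
-- neighbours.setdefault(k, []).append(x)  ==  modify k [] (· ++ [x]);
-- the final dict comprehension runs over the (distinct) node keys, hence is a map.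
def create_complete_adjacency_list_alt (list_of_edges : List (Int × Int × Int)) (adjacency_list : List (Int × Int)) : List (Int × List Int) :=
  let edgeKeys := PySem.List.dedup (list_of_edges.map (fun e => (e.1, e.2.1)))
  let nodes := PySem.List.dedup (adjacency_list.map (fun p => p.1))
  let neighbours := edgeKeys.foldl
    (fun d p => (d.modify p.2 ([] : List Int) (· ++ [p.1])).modify p.1 ([] : List Int) (· ++ [p.2]))
    PySem.Dict.empty
  nodes.map (fun node => (node, PySem.List.sorted (neighbours.getD node []) (fun x => x) false))

-- ===== PRECONDITION & SPEC =====
def Spec_create_complete_adjacency_list (list_of_edges : List (Int × Int × Int)) (adjacency_list : List (Int × Int)) (out : List (Int × List Int)) : Prop := out = create_complete_adjacency_list_alt list_of_edges adjacency_list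
instance (list_of_edges : List (Int × Int × Int)) (adjacency_list : List (Int × Int)) (out : List (Int × List Int)) : Decidable (Spec_create_complete_adjacency_list list_of_edges adjacency_list out) := by unfold Spec_create_complete_adjacency_list; infer_instance

-- ===== CLAIM (what is proved, stated in full; the proofs are below) =====
def Claim_equal_create_complete_adjacency_list : Prop := ∀ (list_of_edges : List (Int × Int × Int)) (adjacency_list : List (Int × Int)), Dom_create_complete_adjacency_list list_of_edges adjacency_list → Spec_create_complete_adjacency_list list_of_edges adjacency_list (create_complete_adjacency_list list_of_edges adjacency_list)

-- ===== LEMMAS AND PROOFS =====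

-- B's double-modify loop over the edge keys is the single-modify loop over the flattened
-- endpoint pairs.
theorem pv_flatten (l : List (Int × Int)) (d : PySem.Dict Int (List Int)) :
    l.foldl (fun d p => (d.modify p.2 ([] : List Int) (· ++ [p.1])).modify p.1 ([] : List Int) (· ++ [p.2])) d
      = (l.flatMap (fun p => [(p.2, p.1), (p.1, p.2)])).foldl
          (fun d q => d.modify q.1 ([] : List Int) (· ++ [q.2])) d := by
  induction l generalizing d with
  | nil => rfl
  | cons p l ih => simp [List.flatMap_cons, ih]

-- the bucket of a node is a permutation of A's "incoming then outgoing" list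
theorem pv_perm (l : List (Int × Int)) (n : Int) :
    (((l.flatMap (fun p => [(p.2, p.1), (p.1, p.2)])).filter (fun q => q.1 == n)).map (fun q => q.2)).Perm
      ((l.filter (fun x => x.2 == n)).map (fun t => t.1) ++ (l.filter (fun x => x.1 == n)).map (fun t => t.2)) := by
  induction l with
  | nil => simp
  | cons p l ih =>
    obtain ⟨a, b⟩ := p
    simp only [List.flatMap_cons, List.cons_append, List.filter_cons, beq_iff_eq]
    by_cases h2 : b = n <;> by_cases h1 : a = n <;>
      simp only [h1, h2, if_true, if_false, List.map_cons, List.cons_append]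
    · exact (ih.cons n).trans List.perm_middle.symm |>.cons n
    · exact ih.cons a
    · exact (ih.cons b).trans List.perm_middle.symm
    · exact ih

theorem create_complete_adjacency_list_spec : Claim_equal_create_complete_adjacency_list := by
  intro E adj _
  unfold Spec_create_complete_adjacency_list
  unfold create_complete_adjacency_list create_complete_adjacency_list_alt
  set edgeKeys := PySem.List.dedup (E.map (fun e => (e.1, e.2.1))) with hek
  set nodes := PySem.List.dedup (adj.map (fun p => p.1)) with hns
  rw [PySem.Dict.items_foldl_insert_fresh
        (k := fun (n : Int) => n)
        (v := fun node => PySem.List.sorted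
          ((edgeKeys.filter (fun x => x.1 == node)).foldl (fun ns t => ns ++ [t.2])
            ((edgeKeys.filter (fun x => x.2 == node)).foldl (fun ns t => ns ++ [t.1]) []))
          (fun x => x) false)
        (d := PySem.Dict.empty) (l := nodes)
        (by intro a _; simp [PySem.Dict.contains_empty])
        (by simp [hns])]
  simp only [PySem.Dict.empty, List.nil_append]
  apply List.map_congr_left
  intro n _
  rw [pv_flatten, PySem.Dict.getD_foldl_modify_append]
  simp only [List.nil_append, PySem.List.foldl_append_singleton_eq_map]
  exact congrArg (fun l => ((n : Int), l))
    (PySem.List.sorted_eq_sorted_of_perm _ _ _ (fun a b h => h) ((pv_perm edgeKeys n).symm))
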